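-- pv_equiv track=rewrite | github.com/Praveen-Kumar-SGK/SGK | extractor/ferrero_f8.py | nurtri_split_list_f3
-- ===== SOURCE A (Python) =====
-- def nurtri_split_list_f3(content_list_1):
--     new_cnt_list = []
--     for j in range(0, len(content_list_1[0])):
--         if 'nutritional' in content_list_1[0][j].lower() and 'information' in content_list_1[0][j + 1].lower():
--             #         if content_list_1[0][j] not in new_cnt_list:
--             new_cnt_list.append(content_list_1[0][j:])
--     size = len(new_cnt_list[0])
--     idx_list = [idx + 1 for idx, val in
--                 enumerate(new_cnt_list[0]) if "nutritional" in val.lower() or "영양정보" in val]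
--
--     res = [new_cnt_list[0][i: j] for i, j in
--            zip([0] + idx_list, idx_list +
--                ([size] if idx_list[-1] != size else []))]
--
--     return res
-- ===== SOURCE B (Python) =====
-- def nurtri_split_list_f3(content_list_1):
--     row = content_list_1[0]
--     j = next(i for i in range(len(row))
--              if 'nutritional' in row[i].lower() and 'information' in row[i + 1].lower())
--     groups, cur = [], []
--     for cell in row[j:]:
--         cur.append(cell)
--         if 'nutritional' in cell.lower() or '영양정보' in cell:
--             groups.append(cur)
--             cur = []
--     if cur:
--         groups.append(cur)
--     return groups
-- ===== Notes on version B (the rewrite author's own statement) =====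
-- stated objective: faster
-- what changed: B finds only the first marker pair (next over an index generator) and then groups the suffix in one accumulator pass, instead of A's collecting a sliced-suffix copy for every marker pair, re-scanning with enumerate to build an index list, and slicing again via zip of index pairs.
-- crash fix: When a marker pair exists but the last cell of content_list_1[0] also contains 'nutritional', A's full scan raises IndexError at row[j+1] while B, which stops at the first pair, returns the grouping. — e.g. on nurtri_split_list_f3([["nutritional", "information", "nutritional"]]): A raises IndexError, B returns [["nutritional"], ["information", "nutritional"]]
import Mathlib
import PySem

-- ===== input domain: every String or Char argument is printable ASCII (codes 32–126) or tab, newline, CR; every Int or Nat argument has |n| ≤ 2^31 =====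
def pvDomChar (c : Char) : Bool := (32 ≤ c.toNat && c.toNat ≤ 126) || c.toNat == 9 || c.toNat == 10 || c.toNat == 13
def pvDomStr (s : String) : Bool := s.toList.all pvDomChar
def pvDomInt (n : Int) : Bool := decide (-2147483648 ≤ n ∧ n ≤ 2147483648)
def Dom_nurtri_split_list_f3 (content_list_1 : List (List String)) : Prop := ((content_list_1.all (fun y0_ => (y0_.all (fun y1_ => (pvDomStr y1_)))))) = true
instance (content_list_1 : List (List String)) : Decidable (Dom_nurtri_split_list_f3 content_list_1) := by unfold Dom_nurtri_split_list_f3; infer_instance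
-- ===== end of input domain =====

-- B replaces A's collect-all-suffixes / enumerate-index-list / zip-slice pipeline by finding the
-- first marker pair and grouping the suffix in one accumulator pass (no per-marker suffix copies).

-- shared marker predicates ('nutritional' in s.lower(), 'information' in s.lower(), the idx_list test)
def pvNutr (s : String) : Bool := PySem.Str.isIn "nutritional" (PySem.Str.lower s)
def pvInfo (s : String) : Bool := PySem.Str.isIn "information" (PySem.Str.lower s)
def pvMark (s : String) : Bool := pvNutr s || PySem.Str.isIn "영양정보" s

-- ===== PORT A =====
def nurtri_split_list_f3 (content_list_1 : List (List String)) : List (List String) :=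
  let row := PySem.List.pyGetD content_list_1 0 []
  -- for j in range(0, len(row)): if 'nutritional' in row[j].lower() and 'information' in row[j+1].lower(): append row[j:]
  let new_cnt_list :=
    (PySem.List.pyRange 0 row.length 1).foldl
      (fun acc j =>
        if pvNutr (PySem.List.pyGetD row j "") && pvInfo (PySem.List.pyGetD row (j + 1) "")
        then acc ++ [PySem.List.slice row (some j) none] else acc) []
  let first := PySem.List.pyGetD new_cnt_list 0 []
  let size : Int := first.length
  -- idx_list = [idx+1 for idx, val in enumerate(first) if "nutritional" in val.lower() or "영양정보" in val]
  let idx_list :=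
    (PySem.List.enumerate first).foldl
      (fun acc p => if pvMark p.2 then acc ++ [p.1 + 1] else acc) []
  -- res = [first[i:j] for i, j in zip([0]+idx_list, idx_list + ([size] if idx_list[-1] != size else []))]
  (((0 : Int) :: idx_list).zip
      (idx_list ++ (if PySem.List.pyGetD idx_list (-1) 0 ≠ size then [size] else []))).map
    (fun ij => PySem.List.slice first (some ij.1) (some ij.2))

-- ===== PORT B =====
-- condition of Source B's generator: 'nutritional' in row[i].lower() and 'information' in row[i+1].lower()
def pvPairAt (row : List String) (i : Nat) : Bool :=
  pvNutr (row.getD i "") && pvInfo (row.getD (i + 1) "")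

-- one step of Source B's grouping loop over (groups, cur)
def pvStep (st : List (List String) × List String) (cell : String) :
    List (List String) × List String :=
  let cur := st.2 ++ [cell]
  if pvMark cell then (st.1 ++ [cur], []) else (st.1, cur)

def nurtri_split_list_f3_alt (content_list_1 : List (List String)) : List (List String) :=
  let row := PySem.List.pyGetD content_list_1 0 []
  -- j = next(i for i in range(len(row)) if …)  (no match = exception, outside Pre_; default is junk)
  let j : Nat := ((List.range row.length).find? (pvPairAt row)).getD row.length
  let res := (row.drop j).foldl pvStep ([], [])
  if res.2.isEmpty then res.1 else res.1 ++ [res.2]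

-- ===== PRECONDITION & SPEC =====
-- Pre_ excludes exactly the inputs where Python A raises: empty content_list_1 / no marker pair
-- (IndexError on [0]) and a last row-cell containing 'nutritional' (IndexError at row[j+1]).
def Pre_nurtri_split_list_f3 (content_list_1 : List (List String)) : Prop :=
  content_list_1 ≠ [] ∧
  pvNutr ((content_list_1.headD []).getLastD "") = false ∧
  ∃ i < (content_list_1.headD []).length,
    i + 1 < (content_list_1.headD []).length ∧
    pvNutr ((content_list_1.headD []).getD i "") = true ∧
    pvInfo ((content_list_1.headD []).getD (i + 1) "") = true
instance (content_list_1 : List (List String)) : Decidable (Pre_nurtri_split_list_f3 content_list_1) := by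
  unfold Pre_nurtri_split_list_f3; infer_instance

def pvWitness_nurtri_split_list_f3 : List (List String) :=
  [["Nutritional", "Information", "fat 3g", "salt 1g"]]

-- A raises IndexError (at row[j+1]) when a marker pair exists but the last cell also contains
-- 'nutritional'; B stops at the first pair and returns the grouping.
def Raises_nurtri_split_list_f3 (content_list_1 : List (List String)) : Prop :=
  pvNutr ((content_list_1.headD []).getLastD "") = true ∧
  ∃ i < (content_list_1.headD []).length,
    i + 1 < (content_list_1.headD []).length ∧
    pvNutr ((content_list_1.headD []).getD i "") = true ∧
    pvInfo ((content_list_1.headD []).getD (i + 1) "") = true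
instance (content_list_1 : List (List String)) : Decidable (Raises_nurtri_split_list_f3 content_list_1) := by
  unfold Raises_nurtri_split_list_f3; infer_instance

def pvRaiseWitness_nurtri_split_list_f3 : List (List String) :=
  [["nutritional", "information", "nutritional"]]
def pvRaiseWitnessOut_nurtri_split_list_f3 : List (List String) :=
  [["nutritional"], ["information", "nutritional"]]

def Spec_nurtri_split_list_f3 (content_list_1 : List (List String)) (out : List (List String)) : Prop := out = nurtri_split_list_f3_alt content_list_1
instance (content_list_1 : List (List String)) (out : List (List String)) : Decidable (Spec_nurtri_split_list_f3 content_list_1 out) := by unfold Spec_nurtri_split_list_f3; infer_instance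

-- ===== CLAIM (what is proved, stated in full; the proofs are below) =====
def Claim_equal_nurtri_split_list_f3 : Prop := ∀ (content_list_1 : List (List String)), Dom_nurtri_split_list_f3 content_list_1 → Pre_nurtri_split_list_f3 content_list_1 → Spec_nurtri_split_list_f3 content_list_1 (nurtri_split_list_f3 content_list_1)
def Claim_raises_nurtri_split_list_f3 : Prop := (∀ (content_list_1 : List (List String)), Dom_nurtri_split_list_f3 content_list_1 → Raises_nurtri_split_list_f3 content_list_1 → ¬ Pre_nurtri_split_list_f3 content_list_1) ∧ (Dom_nurtri_split_list_f3 (pvRaiseWitness_nurtri_split_list_f3) ∧ Raises_nurtri_split_list_f3 (pvRaiseWitness_nurtri_split_list_f3) ∧ nurtri_split_list_f3_alt (pvRaiseWitness_nurtri_split_list_f3) = pvRaiseWitnessOut_nurtri_split_list_f3)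

-- ===== LEMMAS AND PROOFS =====

-- clean recursive form of B's grouping loop
def pvGrp : List String → List String → List (List String)
  | cur, [] => if cur.isEmpty then [] else [cur]
  | cur, c :: t => if pvMark c then (cur ++ [c]) :: pvGrp [] t else pvGrp (cur ++ [c]) t

-- clean recursive form of A's zip-slice stage
def pvRes : List String → List (List String)
  | [] => []
  | c :: t =>
    if pvMark c then [c] :: pvRes t
    else match pvRes t with
         | [] => [[c]]
         | g :: gs => (c :: g) :: gs

-- A's idx_list over a suffix s (filter/map form of the enumerate fold)
def pvIdx (s : List String) : List Int :=
  ((PySem.List.enumerate s).filter (fun p => pvMark p.2)).map (fun p => p.1 + 1)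

-- A's zip-slice stage over a suffix s
def pvResC (s : List String) : List (List String) :=
  (((0 : Int) :: pvIdx s).zip
      (pvIdx s ++ (if PySem.List.pyGetD (pvIdx s) (-1) 0 ≠ (s.length : Int) then [(s.length : Int)] else []))).map
    (fun ij => PySem.List.slice s (some ij.1) (some ij.2))

lemma pv_enumerate_shift {α : Type} (s : List α) (k : Int) :
    PySem.List.enumerate s (k + 1) = (PySem.List.enumerate s k).map (fun p => (p.1 + 1, p.2)) := by
  induction s generalizing k with
  | nil => simp [PySem.List.enumerate]
  | cons c t ih =>
    simp [PySem.List.enumerate_cons, ih (k + 1)]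

lemma pvIdx_cons (c : String) (t : List String) :
    pvIdx (c :: t) = (if pvMark c then [1] else []) ++ (pvIdx t).map (· + 1) := by
  unfold pvIdx
  rw [show PySem.List.enumerate (c :: t) 0 = (0, c) :: PySem.List.enumerate t 1 from
    PySem.List.enumerate_cons .., show (1 : Int) = 0 + 1 from rfl, pv_enumerate_shift]
  by_cases h : pvMark c <;> simp [h, List.filter_map, List.map_map, Function.comp_def]

lemma pv_mem_pvIdx_pos (s : List String) : ∀ x ∈ pvIdx s, 1 ≤ x := by
  induction s with
  | nil => simp [pvIdx, PySem.List.enumerate]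
  | cons c t ih =>
    rw [pvIdx_cons]
    intro x hx
    rcases List.mem_append.mp hx with h | h
    · by_cases hm : pvMark c <;> simp [hm] at h; omega
    · rcases List.mem_map.mp h with ⟨y, hy, rfl⟩
      have := ih y hy; omega

lemma pv_pyGetD_neg_one_int (l : List Int) :
    PySem.List.pyGetD l (-1) 0 = l.getLast?.getD 0 := by
  cases l with
  | nil => decide
  | cons x xs => simp [pysem, List.getLast?_eq_getElem?]; rfl

lemma pv_slice_shift (c : String) (t : List String) (a b : Int) (ha : 0 ≤ a) (hb : 0 ≤ b) :
    PySem.List.slice (c :: t) (some (a + 1)) (some (b + 1)) =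
      PySem.List.slice t (some a) (some b) := by
  rw [PySem.List.slice_toNat _ (by omega) (by omega), PySem.List.slice_toNat _ ha hb]
  have h1 : (a + 1).toNat = a.toNat + 1 := by omega
  have h2 : (b + 1).toNat = b.toNat + 1 := by omega
  simp [h1, h2]

lemma pv_if_shift (x n : Int) :
    (if x + 1 ≠ n + 1 then [n + 1] else []) = (if x ≠ n then [n] else []).map (· + 1) := by
  split_ifs with h1 h2 h2 <;> simp_all <;> omega

lemma pv_last_cons_zero (q : List Int) :
    PySem.List.pyGetD ((0 : Int) :: q) (-1) 0 = PySem.List.pyGetD q (-1) 0 := by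
  cases q with
  | nil => decide
  | cons a q2 => rw [pv_pyGetD_neg_one_int, pv_pyGetD_neg_one_int, List.getLast?_cons_cons]

lemma pv_last_map_shift (q : List Int) (hq : q ≠ []) :
    PySem.List.pyGetD (q.map (· + 1)) (-1) 0 = PySem.List.pyGetD q (-1) 0 + 1 := by
  rw [pv_pyGetD_neg_one_int, pv_pyGetD_neg_one_int, List.getLast?_map]
  cases hq' : q.getLast? with
  | none => exact absurd (List.getLast?_eq_none_iff.mp hq') hq
  | some x => simp

lemma pv_slice_zero_succ (c : String) (t : List String) (a : Int) (ha : 0 ≤ a) :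
    PySem.List.slice (c :: t) (some 0) (some (a + 1)) = c :: PySem.List.slice t (some 0) (some a) := by
  rw [PySem.List.slice_toNat _ le_rfl (by omega), PySem.List.slice_toNat _ le_rfl ha]
  have h1 : (a + 1).toNat = a.toNat + 1 := by omega
  simp [h1]

lemma pv_slice_zero_zero (t : List String) :
    PySem.List.slice t (some 0) (some 0) = [] := by
  rw [PySem.List.slice_toNat _ le_rfl le_rfl]; simp

lemma pv_slice_zero_len (t : List String) :
    PySem.List.slice t (some 0) (some (t.length : Int)) = t := by
  rw [PySem.List.slice_toNat _ le_rfl (by positivity)]; simp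

lemma pv_zip_shift (c : String) (t : List String) (l1 l2 : List Int)
    (h1 : ∀ x ∈ l1, 0 ≤ x) (h2 : ∀ x ∈ l2, 0 ≤ x) :
    ((l1.map (· + 1)).zip (l2.map (· + 1))).map
        (fun ij => PySem.List.slice (c :: t) (some ij.1) (some ij.2))
      = (l1.zip l2).map (fun ij => PySem.List.slice t (some ij.1) (some ij.2)) := by
  rw [List.zip_map, List.map_map]
  apply List.map_congr_left
  intro p hp
  obtain ⟨hpa, hpb⟩ := List.of_mem_zip hp
  exact pv_slice_shift c t p.1 p.2 (h1 _ hpa) (h2 _ hpb)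

lemma pv_zip_main (c : String) (t : List String) (a : Int) (ha : 0 ≤ a) (l1 l2 : List Int)
    (h1 : ∀ x ∈ l1, 0 ≤ x) (h2 : ∀ x ∈ l2, 0 ≤ x) :
    (((0 : Int) :: (a :: l1).map (· + 1)).zip (((a :: l1) ++ l2).map (· + 1))).map
        (fun ij => PySem.List.slice (c :: t) (some ij.1) (some ij.2))
      = (c :: PySem.List.slice t (some 0) (some a)) ::
          ((a :: l1).zip (l1 ++ l2)).map (fun ij => PySem.List.slice t (some ij.1) (some ij.2)) := by
  have hA : ∀ x ∈ a :: l1, (0 : Int) ≤ x := by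
    intro x hx; rcases List.mem_cons.mp hx with rfl | hx
    · exact ha
    · exact h1 x hx
  have hB : ∀ x ∈ l1 ++ l2, (0 : Int) ≤ x := by
    intro x hx; rcases List.mem_append.mp hx with hx | hx
    · exact h1 x hx
    · exact h2 x hx
  simp only [List.map_cons, List.map_append]
  simp only [List.cons_append, List.zip_cons_cons, List.map_cons]
  rw [pv_slice_zero_succ c t a ha]
  congr 1
  have htail := pv_zip_shift c t (a :: l1) (l1 ++ l2) hA hB
  simpa [List.map_cons, List.map_append] using htail

lemma pvResC_eq_pvRes (s : List String) : pvResC s = pvRes s := by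
  induction s with
  | nil => simp [pvResC, pvRes, pvIdx, PySem.List.enumerate, pv_pyGetD_neg_one_int]
  | cons c t ih =>
    have hq_pos := pv_mem_pvIdx_pos t
    cases hm : pvMark c with
    | true =>
      unfold pvResC
      rw [pvIdx_cons]
      simp only [hm, if_true, List.singleton_append, List.length_cons, Nat.cast_add, Nat.cast_one]
      rw [show (1 : Int) :: (pvIdx t).map (· + 1) = ((0 : Int) :: pvIdx t).map (· + 1) from by simp]
      rw [pv_last_map_shift _ (by simp), pv_last_cons_zero, pv_if_shift, ← List.map_append]
      rw [pv_zip_main c t 0 le_rfl (pvIdx t) _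
        (fun x hx => le_trans zero_le_one (hq_pos x hx))
        (by intro x hx; split at hx <;> simp_all)]
      rw [pv_slice_zero_zero]
      simp [pvRes, hm, ← ih, pvResC]
    | false =>
      unfold pvResC
      rw [pvIdx_cons]
      simp only [hm, Bool.false_eq_true, if_false, List.nil_append, List.length_cons,
        Nat.cast_add, Nat.cast_one]
      cases hq : pvIdx t with
      | nil =>
        simp only [List.map_nil, List.nil_append]
        rw [if_pos (by rw [show PySem.List.pyGetD ([] : List Int) (-1) 0 = 0 from rfl]; positivity)]
        rw [show ((0 : Int) :: []).zip [(t.length : Int) + 1] = [((0 : Int), (t.length : Int) + 1)] from rfl]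
        rw [List.map_singleton]
        rw [show ((t.length : Int) + 1) = (((c :: t).length : Nat) : Int) from by push_cast [List.length_cons]; ring]
        rw [pv_slice_zero_len (c :: t)]
        cases t with
        | nil => simp [pvRes, hm]
        | cons d t2 =>
          have ht : pvRes (d :: t2) = [d :: t2] := by
            rw [← ih]
            unfold pvResC
            rw [hq]
            rw [if_pos (by
              rw [show PySem.List.pyGetD ([] : List Int) (-1) 0 = 0 from rfl]
              simp only [List.length_cons]; omega)]
            rw [List.nil_append,
              show ((0 : Int) :: ([] : List Int)).zip [(((d :: t2).length : Nat) : Int)]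
                = [((0 : Int), (((d :: t2).length : Nat) : Int))] from rfl,
              List.map_singleton, pv_slice_zero_len (d :: t2)]
          rw [show pvRes (c :: d :: t2)
              = (match pvRes (d :: t2) with | [] => [[c]] | g :: gs => (c :: g) :: gs) from by
            simp [pvRes, hm]]
          rw [ht]
      | cons a q2 =>
        have ha1 : (1 : Int) ≤ a := hq_pos a (by rw [hq]; exact List.mem_cons_self)
        have hq2 : ∀ x ∈ q2, (1 : Int) ≤ x := fun x hx => hq_pos x (by rw [hq]; exact List.mem_cons_of_mem _ hx)
        rw [pv_last_map_shift _ (by simp), pv_if_shift, ← List.map_append]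
        rw [pv_zip_main c t a (by omega) q2 _
          (fun x hx => le_trans zero_le_one (hq2 x hx))
          (by intro x hx; split at hx <;> simp_all)]
        have ht : pvRes t =
            PySem.List.slice t (some 0) (some a) ::
              ((a :: q2).zip (q2 ++ if PySem.List.pyGetD (a :: q2) (-1) 0 ≠ (t.length : Int)
                  then [(t.length : Int)] else [])).map
                (fun ij => PySem.List.slice t (some ij.1) (some ij.2)) := by
          rw [← ih]
          unfold pvResC
          rw [hq]
          simp only [List.cons_append, List.zip_cons_cons, List.map_cons]
        rw [show pvRes (c :: t)
            = (match pvRes t with | [] => [[c]] | g :: gs => (c :: g) :: gs) from by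
          simp [pvRes, hm]]
        rw [ht]

lemma pv_foldB (s : List String) : ∀ (gs : List (List String)) (cur : List String),
    (if (s.foldl pvStep (gs, cur)).2.isEmpty then (s.foldl pvStep (gs, cur)).1
     else (s.foldl pvStep (gs, cur)).1 ++ [(s.foldl pvStep (gs, cur)).2]) = gs ++ pvGrp cur s := by
  induction s with
  | nil =>
    intro gs cur
    by_cases h : cur.isEmpty <;> simp_all [pvGrp]
  | cons c t ih =>
    intro gs cur
    rw [List.foldl_cons]
    by_cases h : pvMark c
    · rw [show pvStep (gs, cur) c = (gs ++ [cur ++ [c]], []) from by simp [pvStep, h], ih]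
      simp [pvGrp, h]
    · rw [show pvStep (gs, cur) c = (gs, cur ++ [c]) from by simp [pvStep, h], ih]
      simp [pvGrp, h]

lemma pvGrp_eq (s : List String) : ∀ cur : List String,
    pvGrp cur s = (match pvRes s with
                   | [] => if cur.isEmpty then [] else [cur]
                   | g :: gs => (cur ++ g) :: gs) := by
  induction s with
  | nil => intro cur; simp [pvGrp, pvRes]
  | cons c t ih =>
    intro cur
    by_cases h : pvMark c
    · simp only [pvGrp, pvRes, h, if_true, ih []]
      cases hres : pvRes t <;> simp
    · simp only [pvGrp, pvRes, h, if_false, ih (cur ++ [c])]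
      cases hres : pvRes t <;> simp

lemma pvGrp_nil_eq (s : List String) : pvGrp [] s = pvRes s := by
  rw [pvGrp_eq s []]
  cases pvRes s <;> simp

-- B's whole computation on a suffix equals A's zip-slice stage on the same suffix
lemma pv_suffix_eq (s : List String) :
    (if (s.foldl pvStep ([], [])).2.isEmpty then (s.foldl pvStep ([], [])).1
     else (s.foldl pvStep ([], [])).1 ++ [(s.foldl pvStep ([], [])).2]) = pvResC s := by
  rw [pv_foldB s [] [], List.nil_append, pvGrp_nil_eq, pvResC_eq_pvRes]

-- the two generator/loop conditions agree
lemma pv_cond_eq (row : List String) :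
    ((fun j : Int => pvNutr (PySem.List.pyGetD row j "") && pvInfo (PySem.List.pyGetD row (j + 1) "")) ∘
        (fun k : Nat => (k : Int))) = pvPairAt row := by
  funext i
  simp only [Function.comp_apply, pvPairAt, PySem.List.pyGetD_natCast, ← Nat.cast_add_one]

-- A's two folds rewritten, and both ports reduced to the common suffix
lemma pv_ports_eq (cl : List (List String)) :
    nurtri_split_list_f3 cl = nurtri_split_list_f3_alt cl := by
  simp only [nurtri_split_list_f3, nurtri_split_list_f3_alt]
  rw [PySem.List.foldl_append_if, List.nil_append, PySem.List.pyRange_zero_nat,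
    List.filter_map, pv_cond_eq]
  cases hfind : (List.range (PySem.List.pyGetD cl 0 []).length).find? (pvPairAt (PySem.List.pyGetD cl 0 [])) with
  | none =>
    have hnil : (List.range (PySem.List.pyGetD cl 0 []).length).filter
        (pvPairAt (PySem.List.pyGetD cl 0 [])) = [] :=
      List.filter_eq_nil_iff.mpr (List.find?_eq_none.mp hfind)
    rw [hnil]
    simp only [List.map_nil, Option.getD_none, List.drop_length]
    rw [pv_suffix_eq]
    simp only [PySem.List.foldl_append_if, List.nil_append]
    rw [show PySem.List.pyGetD ([] : List (List String)) 0 [] = [] from rfl]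
    rfl
  | some i =>
    obtain ⟨rest, hrest⟩ := List.head?_eq_some_iff.mp (by rw [List.head?_filter, hfind])
    rw [hrest]
    simp only [List.map_cons, PySem.List.pyGetD_zero_cons, Option.getD_some,
      PySem.List.slice_from_natCast]
    rw [pv_suffix_eq]
    simp only [PySem.List.foldl_append_if, List.nil_append]
    rfl

-- ===== VERDICT (by name: the statement is the Claim_ definition above) =====
theorem nurtri_split_list_f3_spec : Claim_equal_nurtri_split_list_f3 := by
  intro cl _ _
  unfold Spec_nurtri_split_list_f3
  exact pv_ports_eq cl

theorem nurtri_split_list_f3_raises : Claim_raises_nurtri_split_list_f3 := by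
  unfold Claim_raises_nurtri_split_list_f3
  refine ⟨fun cl _ hr hp => ?_, by decide⟩
  have h1 := hr.1
  rw [hp.2.1] at h1
  exact Bool.false_ne_true h1

-- self-check: B's port really returns the stated value at the raise witness (projection of the theorem above)
theorem pvRaiseWitness_nurtri_split_list_f3_ok :
    nurtri_split_list_f3_alt pvRaiseWitness_nurtri_split_list_f3 = pvRaiseWitnessOut_nurtri_split_list_f3 :=
  nurtri_split_list_f3_raises.2.2.2
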